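-- pv_equiv track=rewrite | github.com/BlueBrain/scholaretl | src/scholaretl/utils.py | adjust_abstract_and_section_paragraphs
-- ===== SOURCE A (Python) =====
-- def adjust_abstract_and_section_paragraphs(
--     abstract: list[str], section_paragraphs: list[tuple[str, str]]
-- ) -> tuple[list[str], list[tuple[str, str]]]:
--     """Send the first unnamed section_paragraphs to the abstract if it is empty.
--
--     Parameters
--     ----------
--     abstract
--         List of text parsed coming from the abstract in the article.
--     section_paragraphs
--         List of (section_name, text) parsed in the article.
--
--     Return
--     ------
--     tuple[list[str], list[tuple[str, str]]]
--         New adjusted abstract and section paragraphs.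
--     """
--     if not abstract:
--         nonempty_sections = (
--             i for i, (section, _) in enumerate(section_paragraphs) if section
--         )
--
--         try:
--             i_first = next(nonempty_sections)
--         except StopIteration:
--             i_first = len(section_paragraphs)
--
--         new_section_paragraphs = section_paragraphs[i_first:]
--         new_abstract_paragraphs = [
--             paragraph for _, paragraph in section_paragraphs[:i_first]
--         ]
--
--         return new_abstract_paragraphs, new_section_paragraphs
--     else:
--         return abstract, section_paragraphs
-- ===== SOURCE B (Python) =====
-- def adjust_abstract_and_section_paragraphs(abstract, section_paragraphs):
--     if abstract:
--         return abstract, section_paragraphs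
--     new_abstract = []
--     rest = section_paragraphs
--     while rest:
--         section, paragraph = rest[0]
--         if section:
--             break
--         new_abstract.append(paragraph)
--         rest = rest[1:]
--     return new_abstract, rest
-- ===== Notes on version B (the rewrite author's own statement) =====
-- stated objective: alternative
-- what changed: Replaces the enumerate-generator index search plus double slicing with a single break-based loop that accumulates leading unnamed paragraphs and keeps the remaining suffix directly.
import Mathlib
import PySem

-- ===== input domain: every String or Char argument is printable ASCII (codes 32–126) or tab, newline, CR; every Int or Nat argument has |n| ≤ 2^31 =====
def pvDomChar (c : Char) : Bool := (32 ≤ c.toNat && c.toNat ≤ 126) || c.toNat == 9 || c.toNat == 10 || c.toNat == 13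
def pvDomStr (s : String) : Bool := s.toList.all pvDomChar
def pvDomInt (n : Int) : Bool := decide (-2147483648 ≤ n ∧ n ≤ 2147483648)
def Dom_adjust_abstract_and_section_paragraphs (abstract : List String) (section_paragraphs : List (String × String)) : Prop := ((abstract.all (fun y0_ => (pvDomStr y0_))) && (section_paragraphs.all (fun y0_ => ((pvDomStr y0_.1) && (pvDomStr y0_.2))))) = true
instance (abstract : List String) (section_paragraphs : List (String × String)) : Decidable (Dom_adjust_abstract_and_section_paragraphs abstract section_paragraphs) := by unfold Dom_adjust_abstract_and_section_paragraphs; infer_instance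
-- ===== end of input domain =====

-- B replaces A's generator index search + two slices with one break-based accumulating loop; objective: alternative decomposition.


-- ===== PORT A =====
-- next(i for i,(section,_) in enumerate(sps) if section), defaulting to len(sps)
def pvFirstNamedIdx : List (String × String) → Nat
  | [] => 0
  | (s, _) :: rest => if s ≠ "" then 0 else pvFirstNamedIdx rest + 1

def adjust_abstract_and_section_paragraphs (abstract : List String) (section_paragraphs : List (String × String)) : List String × (List (String × String)) :=
  if abstract = [] then
    let i_first := pvFirstNamedIdx section_paragraphs
    -- section_paragraphs[i_first:] and [ paragraph for _, paragraph in section_paragraphs[:i_first] ]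
    let new_section_paragraphs := section_paragraphs.drop i_first
    let new_abstract_paragraphs := (section_paragraphs.take i_first).map (fun p => p.2)
    (new_abstract_paragraphs, new_section_paragraphs)
  else
    (abstract, section_paragraphs)

-- ===== PORT B =====
-- the while-loop of Source B: accumulate paragraphs until the first named section, break there
def pvPartitionLoop (acc : List String) : List (String × String) → List String × (List (String × String))
  | [] => (acc, [])
  | (sec, paragraph) :: rest =>
    if sec ≠ "" then (acc, (sec, paragraph) :: rest)
    else pvPartitionLoop (acc ++ [paragraph]) rest

def adjust_abstract_and_section_paragraphs_alt (abstract : List String) (section_paragraphs : List (String × String)) : List String × (List (String × String)) :=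
  if abstract ≠ [] then (abstract, section_paragraphs)
  else pvPartitionLoop [] section_paragraphs

-- ===== PRECONDITION & SPEC =====
def Spec_adjust_abstract_and_section_paragraphs (abstract : List String) (section_paragraphs : List (String × String)) (out : List String × (List (String × String))) : Prop := out = adjust_abstract_and_section_paragraphs_alt abstract section_paragraphs
instance (abstract : List String) (section_paragraphs : List (String × String)) (out : List String × (List (String × String))) : Decidable (Spec_adjust_abstract_and_section_paragraphs abstract section_paragraphs out) := by unfold Spec_adjust_abstract_and_section_paragraphs; infer_instance

-- ===== CLAIM (what is proved, stated in full; the proofs are below) =====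
def Claim_equal_adjust_abstract_and_section_paragraphs : Prop := ∀ (abstract : List String) (section_paragraphs : List (String × String)), Dom_adjust_abstract_and_section_paragraphs abstract section_paragraphs → Spec_adjust_abstract_and_section_paragraphs abstract section_paragraphs (adjust_abstract_and_section_paragraphs abstract section_paragraphs)

-- ===== LEMMAS AND PROOFS =====
theorem pvPartitionLoop_eq (sps : List (String × String)) : ∀ acc : List String,
    pvPartitionLoop acc sps =
      (acc ++ (sps.take (pvFirstNamedIdx sps)).map (fun p => p.2), sps.drop (pvFirstNamedIdx sps)) := by
  induction sps with
  | nil => intro acc; simp [pvPartitionLoop, pvFirstNamedIdx]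
  | cons hd tl ih =>
    intro acc
    obtain ⟨s, p⟩ := hd
    by_cases hs : s = ""
    · simp [pvPartitionLoop, pvFirstNamedIdx, hs, ih]
    · simp [pvPartitionLoop, pvFirstNamedIdx, hs]

-- ===== VERDICT (by name: the statement is the Claim_ definition above) =====
theorem adjust_abstract_and_section_paragraphs_spec : Claim_equal_adjust_abstract_and_section_paragraphs := by
  intro abstract sps _
  unfold Spec_adjust_abstract_and_section_paragraphs adjust_abstract_and_section_paragraphs adjust_abstract_and_section_paragraphs_alt
  by_cases h : abstract = []
  · simp [h, pvPartitionLoop_eq]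
  · simp [h]
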